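-- pv_equiv track=rewrite | github.com/parkchanghyup/algorithm | python/codetree/포탑부수기.py | get_target_tower
-- ===== SOURCE A (Python) =====
-- from typing import List, Tuple, Dict
--
-- def get_target_tower(arr: List[List[int]], tower_last_attack: Dict[Tuple[int, int], int],
--                      weak_tower: Tuple[int, int]) -> Tuple[int, int]:
--     """
--     가장 강한 포탑(공격 대상)을 선정합니다.
--
--     Args:
--         arr (List[List[int]]): 현재 포탑 배열
--         tower_last_attack (Dict[Tuple[int, int], int]): 각 포탑의 마지막 공격 턴
--         weak_tower (Tuple[int, int]): 가장 약한 포탑의 좌표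
--
--     Returns:
--         Tuple[int, int]: 가장 강한 포탑의 좌표
--     """
--     n = len(arr)
--     m = len(arr[0])
--
--     target_tower = []
--     strong_tower = 0
--
--     for i in range(n):
--         for j in range(m):
--             if (i, j) == weak_tower or arr[i][j] == 0:
--                 continue
--             if strong_tower == arr[i][j]:
--                 target_tower.append((i, j))
--             elif strong_tower < arr[i][j]:
--                 strong_tower = arr[i][j]
--                 target_tower = [(i, j)]
--
--     if len(target_tower) == 1:
--         return target_tower[0]
--
--     last_attack = int(1e9)
--     strong_tower_2 = []
--     for (i, j) in target_tower:
--         if tower_last_attack[(i, j)] == last_attack: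
--             strong_tower_2.append((i, j))
--         elif tower_last_attack[(i, j)] < last_attack:
--             strong_tower_2 = [(i, j)]
--             last_attack = tower_last_attack[(i, j)]
--
--     strong_tower_2 = sorted(strong_tower_2, key=lambda x: (x[0] + x[1], x[1]))
--     if len(strong_tower_2) == 0:
--         return ''
--     return strong_tower_2[0]
-- ===== SOURCE B (Python) =====
-- from typing import List, Tuple, Dict
--
-- def get_target_tower(arr: List[List[int]], tower_last_attack: Dict[Tuple[int, int], int],
--                      weak_tower: Tuple[int, int]) -> Tuple[int, int]:
--     # Two-pass champion scan: a plain max scan for the strongest value, then a single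
--     # running-best scan over the max-valued cells comparing (last_attack, i+j, j).
--     n, m = len(arr), len(arr[0])
--     maxval = 0
--     for i in range(n):
--         for j in range(m):
--             if (i, j) != weak_tower and maxval < arr[i][j]:
--                 maxval = arr[i][j]
--     if maxval == 0:
--         raise ValueError("no tower to target")
--     best = None
--     for i in range(n):
--         for j in range(m):
--             if (i, j) == weak_tower or arr[i][j] != maxval:
--                 continue
--             if best is None:
--                 best = (i, j)
--             elif (tower_last_attack[(i, j)], i + j, j) < (tower_last_attack[best], best[0] + best[1], best[1]):
--                 best = (i, j)
--     return best
-- ===== Notes on version B (the rewrite author's own statement) =====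
-- stated objective: simpler
-- what changed: A's two running max/min tie-list accumulator loops plus a final stable sort are replaced by a two-pass champion scan: a plain max scan for the strongest value, then a single running-best scan over the max-valued cells comparing the composite key (last_attack, i+j, j) - no tie lists, no sort.
-- outside the precondition, e.g. on get_target_tower([[0]], {}, (5, 5)): A returns '', B raises ValueError; on get_target_tower([[3, 3]], {(0, 0): 2000000000, (0, 1): 2000000000}, (5, 5)): A returns '', B returns (0, 0)
import Mathlib
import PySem

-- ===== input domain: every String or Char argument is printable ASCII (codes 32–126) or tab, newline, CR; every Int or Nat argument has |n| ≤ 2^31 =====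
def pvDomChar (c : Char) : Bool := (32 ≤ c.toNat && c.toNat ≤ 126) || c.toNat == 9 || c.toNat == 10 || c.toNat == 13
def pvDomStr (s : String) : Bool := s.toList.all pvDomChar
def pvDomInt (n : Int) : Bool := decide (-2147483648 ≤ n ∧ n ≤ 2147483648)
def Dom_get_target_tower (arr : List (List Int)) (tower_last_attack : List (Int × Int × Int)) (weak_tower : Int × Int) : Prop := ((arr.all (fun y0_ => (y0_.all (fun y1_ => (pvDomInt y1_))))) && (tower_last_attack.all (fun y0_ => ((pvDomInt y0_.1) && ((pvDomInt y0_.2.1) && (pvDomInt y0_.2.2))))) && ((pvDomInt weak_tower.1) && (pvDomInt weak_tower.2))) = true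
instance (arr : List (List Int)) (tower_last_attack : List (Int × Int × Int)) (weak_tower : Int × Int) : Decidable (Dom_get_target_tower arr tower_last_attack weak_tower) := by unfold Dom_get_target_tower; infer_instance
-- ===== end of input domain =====

-- B replaces A's two tie-list accumulator loops plus a final sort by a two-pass champion scan:
-- a plain max scan, then a single running-best scan over max-valued cells comparing the
-- composite key (last_attack, i+j, j) (objective: simpler; no tie lists, no sort).
-- A mutates nothing; equivalence is about the return value.

-- arr[i][j]; always in range on admitted inputs (getD 0 only totalizes)
def pvCell (arr : List (List Int)) (i j : Int) : Int :=
  (PySem.List.pyGet? ((PySem.List.pyGet? arr i).getD []) j).getD 0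

-- tower_last_attack[(i,j)]: dict lookup, first match; getD 0 only totalizes (Pre_ demands the key)
def pvLook (tower_last_attack : List (Int × Int × Int)) (p : Int × Int) : Int :=
  ((tower_last_attack.find? (fun e => decide ((e.1, e.2.1) = p))).map (fun e => e.2.2)).getD 0

-- ===== PORT A =====
def get_target_tower (arr : List (List Int)) (tower_last_attack : List (Int × Int × Int)) (weak_tower : Int × Int) : Int × Int :=
  let n : Int := (arr.length : Int)
  let m : Int := (((PySem.List.pyGet? arr 0).getD []).length : Int)
  let r1 := (PySem.List.pyRange 0 n 1).foldl (fun s i =>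
      (PySem.List.pyRange 0 m 1).foldl (fun s j =>
        if (i, j) = weak_tower ∨ pvCell arr i j = 0 then s
        else if s.1 = pvCell arr i j then (s.1, s.2 ++ [(i, j)])
        else if s.1 < pvCell arr i j then (pvCell arr i j, [(i, j)])
        else s) s) ((0 : Int), ([] : List (Int × Int)))
  let target_tower := r1.2
  if target_tower.length = 1 then target_tower.headD (0, 0)
  else
    let r2 := target_tower.foldl (fun s p =>
        if pvLook tower_last_attack p = s.1 then (s.1, s.2 ++ [p])
        else if pvLook tower_last_attack p < s.1 then (pvLook tower_last_attack p, [p])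
        else s) ((1000000000 : Int), ([] : List (Int × Int)))
    -- Python returns '' (not an int pair) when this list is empty; excluded by Pre_, headD only totalizes
    (PySem.List.sorted2 r2.2 (fun x => x.1 + x.2) (fun x => x.2)).headD (0, 0)

-- ===== PORT B =====
-- Python tuple comparison (tla[p], p0+p1, p1) < (tla[q], q0+q1, q1), lexicographic
def pvKLt (tla : List (Int × Int × Int)) (p q : Int × Int) : Bool :=
  decide (pvLook tla p < pvLook tla q ∨
    (pvLook tla p = pvLook tla q ∧
      (p.1 + p.2 < q.1 + q.2 ∨ (p.1 + p.2 = q.1 + q.2 ∧ p.2 < q.2))))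

-- Source B's loop body on best: None -> take (i,j); else keep the key-smaller of the two
def pvChampStep (tla : List (Int × Int × Int)) (b : Option (Int × Int)) (x : Int × Int) : Option (Int × Int) :=
  match b with
  | none => some x
  | some q => if pvKLt tla x q then some x else b

def get_target_tower_alt (arr : List (List Int)) (tower_last_attack : List (Int × Int × Int)) (weak_tower : Int × Int) : Int × Int :=
  let n : Int := (arr.length : Int)
  let m : Int := (((PySem.List.pyGet? arr 0).getD []).length : Int)
  let maxval := (PySem.List.pyRange 0 n 1).foldl (fun mv i =>
      (PySem.List.pyRange 0 m 1).foldl (fun mv j =>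
        if (i, j) ≠ weak_tower ∧ mv < pvCell arr i j then pvCell arr i j else mv) mv) (0 : Int)
  if maxval = 0 then (-1, -1)  -- Python raises ValueError here; outside Pre_
  else
    let best := (PySem.List.pyRange 0 n 1).foldl (fun b i =>
        (PySem.List.pyRange 0 m 1).foldl (fun b j =>
          if (i, j) = weak_tower ∨ pvCell arr i j ≠ maxval then b
          else pvChampStep tower_last_attack b (i, j)) b)
      (none : Option (Int × Int))
    best.getD (-1, -1)

-- ===== PRECONDITION & SPEC =====
-- candidates (positive, not the weak tower) and the max-value tie set, in reading order
def pvCandsP (arr : List (List Int)) (weak_tower : Int × Int) : List (Int × Int) :=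
  ((List.range arr.length).flatMap (fun (i : Nat) =>
      (List.range (arr.headD []).length).map (fun (j : Nat) => ((i : Int), (j : Int))))).filter
    (fun p => decide (0 < pvCell arr p.1 p.2) && decide (p ≠ weak_tower))

def pvBestP (arr : List (List Int)) (weak_tower : Int × Int) : List (Int × Int) :=
  (pvCandsP arr weak_tower).filter
    (fun p => decide (∀ q ∈ pvCandsP arr weak_tower, pvCell arr q.1 q.2 ≤ pvCell arr p.1 p.2))

-- Pre_ excludes: empty arr / a row shorter than row 0 (A raises IndexError); a max-value tie of size ≥ 2
-- with a tower missing from the dict (A raises KeyError); no positive candidate, or a tie of size ≥ 2 whose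
-- last-attack turns all exceed 10^9 (A returns '', which is not an int pair).
def Pre_get_target_tower (arr : List (List Int)) (tower_last_attack : List (Int × Int × Int)) (weak_tower : Int × Int) : Prop :=
  arr ≠ [] ∧
  (∀ row ∈ arr, (arr.headD []).length ≤ row.length) ∧
  pvCandsP arr weak_tower ≠ [] ∧
  (2 ≤ (pvBestP arr weak_tower).length →
     (∀ p ∈ pvBestP arr weak_tower,
        (tower_last_attack.find? (fun e => decide ((e.1, e.2.1) = p))).isSome) ∧
     (∃ p ∈ pvBestP arr weak_tower, pvLook tower_last_attack p ≤ 1000000000))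

instance (arr : List (List Int)) (tower_last_attack : List (Int × Int × Int)) (weak_tower : Int × Int) : Decidable (Pre_get_target_tower arr tower_last_attack weak_tower) := by unfold Pre_get_target_tower; infer_instance

def pvWitness_get_target_tower : List (List Int) × (List (Int × Int × Int)) × (Int × Int) :=
  ([[1, 2], [2, 0]], [(0, 1, 5), (1, 0, 3)], (0, 0))

def Spec_get_target_tower (arr : List (List Int)) (tower_last_attack : List (Int × Int × Int)) (weak_tower : Int × Int) (out : Int × Int) : Prop := out = get_target_tower_alt arr tower_last_attack weak_tower
instance (arr : List (List Int)) (tower_last_attack : List (Int × Int × Int)) (weak_tower : Int × Int) (out : Int × Int) : Decidable (Spec_get_target_tower arr tower_last_attack weak_tower out) := by unfold Spec_get_target_tower; infer_instance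

-- ===== CLAIM (what is proved, stated in full; the proofs are below) =====
def Claim_equal_get_target_tower : Prop := ∀ (arr : List (List Int)) (tower_last_attack : List (Int × Int × Int)) (weak_tower : Int × Int), Dom_get_target_tower arr tower_last_attack weak_tower → Pre_get_target_tower arr tower_last_attack weak_tower → Spec_get_target_tower arr tower_last_attack weak_tower (get_target_tower arr tower_last_attack weak_tower)


-- ===== LEMMAS AND PROOFS =====

-- proof-only helpers
def pvPairs (n m : Int) : List (Int × Int) :=
  (PySem.List.pyRange 0 n 1).flatMap (fun i => (PySem.List.pyRange 0 m 1).map (fun j => (i, j)))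

def pvCondB (arr : List (List Int)) (weak : Int × Int) (p : Int × Int) : Bool :=
  decide (0 < pvCell arr p.1 p.2) && decide (p ≠ weak)

def pvLt (p q : Int × Int) : Bool :=
  decide (p.1 + p.2 < q.1 + q.2) || (!decide (q.1 + q.2 < p.1 + p.2) && decide (p.2 < q.2))

theorem pvLt_true_iff (p q : Int × Int) : pvLt p q = true ↔
    (p.1 + p.2 < q.1 + q.2 ∨ (p.1 + p.2 = q.1 + q.2 ∧ p.2 < q.2)) := by
  simp [pvLt]; omega

theorem pvLt_false_iff (p q : Int × Int) : pvLt p q = false ↔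
    (q.1 + q.2 < p.1 + p.2 ∨ (q.1 + q.2 = p.1 + p.2 ∧ q.2 ≤ p.2)) := by
  simp [pvLt]; omega

theorem pvKLt_true_iff (tla : List (Int × Int × Int)) (p q : Int × Int) : pvKLt tla p q = true ↔
    (pvLook tla p < pvLook tla q ∨
      (pvLook tla p = pvLook tla q ∧
        (p.1 + p.2 < q.1 + q.2 ∨ (p.1 + p.2 = q.1 + q.2 ∧ p.2 < q.2)))) := by
  simp [pvKLt]

theorem pvKLt_false_iff (tla : List (Int × Int × Int)) (p q : Int × Int) : pvKLt tla p q = false ↔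
    (pvLook tla q < pvLook tla p ∨
      (pvLook tla q = pvLook tla p ∧
        (q.1 + q.2 < p.1 + p.2 ∨ (q.1 + q.2 = p.1 + p.2 ∧ q.2 ≤ p.2)))) := by
  simp [pvKLt]; omega

theorem pvKLt_antisymm_eq (tla : List (Int × Int × Int)) (p q : Int × Int)
    (h1 : pvKLt tla p q = false) (h2 : pvKLt tla q p = false) : p = q := by
  rw [pvKLt_false_iff] at h1 h2
  have h3 : p.2 = q.2 := by omega
  have h4 : p.1 = q.1 := by omega
  exact Prod.ext h4 h3

-- A's running max + tie-list loop, in closed form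
theorem runMaxTie {α : Type} (f : α → Int) (xs : List α) : ∀ (v : Int) (acc : List α),
  xs.foldl (fun s x => if s.1 = f x then (s.1, s.2 ++ [x])
            else if s.1 < f x then (f x, [x]) else s) (v, acc)
  = ((xs.map f).foldl max v,
     if (xs.map f).foldl max v = v then acc ++ xs.filter (fun x => decide (f x = v))
     else xs.filter (fun x => decide (f x = (xs.map f).foldl max v))) := by
  induction xs with
  | nil => intro v acc; simp
  | cons x t ih =>
    intro v acc
    have hle : ∀ (w : Int), w ≤ (t.map f).foldl max w := fun w => (PySem.List.le_foldl_max (t.map f) w).1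
    simp only [List.foldl_cons, List.map_cons, List.filter_cons]
    by_cases h1 : v = f x
    · rw [if_pos h1]
      rw [ih]
      have hm : max v (f x) = v := by omega
      simp only [hm]
      by_cases h2 : (t.map f).foldl max v = v
      · simp [h2, ← h1, List.append_assoc]
      · have hne : ¬ f x = (t.map f).foldl max v := by
          have := hle v; omega
        simp only [h2, if_false]
        simp [← h1]
        exact fun h => h2 h.symm
    · rw [if_neg h1]
      by_cases h2 : v < f x
      · rw [if_pos h2]
        rw [ih]
        have hm : max v (f x) = f x := by omega
        simp only [hm]
        by_cases h3 : (t.map f).foldl max (f x) = f x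
        · have hnv : ¬ (t.map f).foldl max (f x) = v := by omega
          have h1' : ¬ f x = v := fun h => h1 h.symm
          simp [h3, h1']
        · have hnv : ¬ (t.map f).foldl max (f x) = v := by have := hle (f x); omega
          have hfx : ¬ f x = (t.map f).foldl max (f x) := fun h => h3 h.symm
          simp [h3, hnv, hfx]
      · rw [if_neg h2]
        rw [ih]
        have hm : max v (f x) = v := by omega
        simp only [hm]
        by_cases h3 : (t.map f).foldl max v = v
        · have h1' : ¬ f x = v := fun h => h1 h.symm
          simp [h3, h1']
        · have hne : ¬ f x = (t.map f).foldl max v := by have := hle v; omega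
          simp [h3, hne]

-- A's running min + tie-list loop, in closed form
theorem runMinTie {α : Type} (f : α → Int) (xs : List α) : ∀ (v : Int) (acc : List α),
  xs.foldl (fun s x => if f x = s.1 then (s.1, s.2 ++ [x])
            else if f x < s.1 then (f x, [x]) else s) (v, acc)
  = ((xs.map f).foldl min v,
     if (xs.map f).foldl min v = v then acc ++ xs.filter (fun x => decide (f x = v))
     else xs.filter (fun x => decide (f x = (xs.map f).foldl min v))) := by
  induction xs with
  | nil => intro v acc; simp
  | cons x t ih =>
    intro v acc
    have hle : ∀ (w : Int), (t.map f).foldl min w ≤ w := fun w => (PySem.List.foldl_min_le (t.map f) w).1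
    simp only [List.foldl_cons, List.map_cons, List.filter_cons]
    by_cases h1 : f x = v
    · rw [if_pos h1]
      rw [ih]
      have hm : min v (f x) = v := by omega
      simp only [hm]
      by_cases h2 : (t.map f).foldl min v = v
      · simp [h2, h1, List.append_assoc]
      · have hne : ¬ f x = (t.map f).foldl min v := by
          have := hle v; omega
        simp only [h2, if_false]
        simp [h1]
        exact fun h => h2 h.symm
    · rw [if_neg h1]
      by_cases h2 : f x < v
      · rw [if_pos h2]
        rw [ih]
        have hm : min v (f x) = f x := by omega
        simp only [hm]
        by_cases h3 : (t.map f).foldl min (f x) = f x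
        · have hnv : ¬ (t.map f).foldl min (f x) = v := by omega
          simp [h3, h1]
        · have hnv : ¬ (t.map f).foldl min (f x) = v := by have := hle (f x); omega
          have hfx : ¬ f x = (t.map f).foldl min (f x) := fun h => h3 h.symm
          simp [h3, hnv, hfx]
      · rw [if_neg h2]
        rw [ih]
        have hm : min v (f x) = v := by omega
        simp only [hm]
        by_cases h3 : (t.map f).foldl min v = v
        · simp [h3, h1]
        · have hne : ¬ f x = (t.map f).foldl min v := by have := hle v; omega
          simp [h3, hne]

-- nested row/column loop = one loop over all (i, j) pairs
theorem pvFoldPairs {σ : Type} (n m : Int) (F : σ → (Int × Int) → σ) (init : σ) :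
    (PySem.List.pyRange 0 n 1).foldl (fun s i =>
        (PySem.List.pyRange 0 m 1).foldl (fun s j => F s (i, j)) s) init
      = (pvPairs n m).foldl F init := by
  rw [pvPairs, List.foldl_flatMap]
  apply PySem.List.foldl_congr_mem
  intro acc i _
  rw [List.foldl_map]

-- 'continue' on a condition = fold over the filtered list
theorem pvFoldSkip {σ α : Type} (C : α → Prop) [DecidablePred C] (f : σ → α → σ)
    (l : List α) (init : σ) :
    l.foldl (fun acc x => if C x then acc else f acc x) init
      = (l.filter (fun x => !decide (C x))).foldl f init := by
  rw [List.foldl_filter]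
  apply PySem.List.foldl_congr_mem
  intro acc x _
  by_cases h : C x <;> simp [h]

-- B's guarded running-max loop = foldl max over the projection of the kept elements
theorem runMaxCond {α : Type} (C : α → Prop) [DecidablePred C] (f : α → Int) (l : List α) :
    ∀ (init : Int), l.foldl (fun mv x => if C x ∧ mv < f x then f x else mv) init
      = ((l.filter (fun x => decide (C x))).map f).foldl max init := by
  induction l with
  | nil => intro init; simp
  | cons x t ih =>
    intro init
    simp only [List.foldl_cons, List.filter_cons]
    by_cases hC : C x
    · have h1 : (if C x ∧ init < f x then f x else init) = max init (f x) := by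
        by_cases h2 : init < f x
        · rw [if_pos ⟨hC, h2⟩]; omega
        · rw [if_neg (fun h => h2 h.2)]; omega
      rw [h1, ih]
      simp [hC]
    · have h1 : (if C x ∧ init < f x then f x else init) = init := by
        rw [if_neg (fun h => hC h.1)]
      rw [h1, ih]
      simp [hC]

-- the champion fold keeps a pvKLt-minimal element once the accumulator is some
theorem pvChampFold_spec (tla : List (Int × Int × Int)) :
    ∀ (S : List (Int × Int)) (a : Int × Int), ∃ r, S.foldl (pvChampStep tla) (some a) = some r ∧
      (r = a ∨ r ∈ S) ∧ pvKLt tla a r = false ∧ ∀ y ∈ S, pvKLt tla y r = false := by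
  intro S
  induction S with
  | nil =>
    intro a
    exact ⟨a, by simp, Or.inl rfl, by rw [pvKLt_false_iff]; omega, by simp⟩
  | cons x t ih =>
    intro a
    by_cases hx : pvKLt tla x a = true
    · obtain ⟨r, hr, hmem, har, hall⟩ := ih x
      refine ⟨r, ?_, ?_, ?_, ?_⟩
      · simpa [List.foldl_cons, pvChampStep, hx] using hr
      · rcases hmem with rfl | hm
        · exact Or.inr List.mem_cons_self
        · exact Or.inr (List.mem_cons_of_mem _ hm)
      · rw [pvKLt_true_iff] at hx
        rw [pvKLt_false_iff] at har ⊢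
        omega
      · intro y hy
        rcases List.mem_cons.mp hy with rfl | hy
        · exact har
        · exact hall y hy
    · obtain ⟨r, hr, hmem, har, hall⟩ := ih a
      have hx' : pvKLt tla x a = false := by simpa using hx
      refine ⟨r, ?_, ?_, har, ?_⟩
      · simpa [List.foldl_cons, pvChampStep, hx'] using hr
      · rcases hmem with rfl | hm
        · exact Or.inl rfl
        · exact Or.inr (List.mem_cons_of_mem _ hm)
      · intro y hy
        rcases List.mem_cons.mp hy with rfl | hy
        · rw [pvKLt_false_iff] at hx' har ⊢
          omega
        · exact hall y hy

-- champion over a nonempty list: exists, is a member, and nothing beats it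
theorem pvChamp_spec (tla : List (Int × Int × Int)) (S : List (Int × Int)) (hS : S ≠ []) :
    ∃ r, S.foldl (pvChampStep tla) none = some r ∧ r ∈ S ∧ ∀ y ∈ S, pvKLt tla y r = false := by
  cases S with
  | nil => exact absurd rfl hS
  | cons x t =>
    rw [List.foldl_cons]
    obtain ⟨r, hr, hmem, hxr, hall⟩ := pvChampFold_spec tla t x
    refine ⟨r, ?_, ?_, ?_⟩
    · simpa [pvChampStep] using hr
    · rcases hmem with rfl | hm
      · exact List.mem_cons_self
      · exact List.mem_cons_of_mem _ hm
    · intro y hy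
      rcases List.mem_cons.mp hy with rfl | hy
      · exact hxr
      · exact hall y hy

theorem pvInsertBy_pairwise (lt : (Int × Int) → (Int × Int) → Bool)
    (hlt : ∀ a b, lt a b = pvLt a b)
    (x : Int × Int) (acc : List (Int × Int))
    (h : acc.Pairwise (fun a b => pvLt b a = false)) :
    (PySem.List.insertBy lt x acc).Pairwise (fun a b => pvLt b a = false) := by
  have hlt' : lt = pvLt := funext fun a => funext fun b => hlt a b
  subst hlt'
  induction acc with
  | nil => simp [PySem.List.insertBy]
  | cons y ys ih =>
    rw [PySem.List.insertBy]
    rcases h with _ | ⟨hy, hys⟩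
    by_cases hxy : pvLt x y = true
    · rw [if_pos hxy]
      constructor
      · intro z hz
        rcases List.mem_cons.mp hz with rfl | hz
        · rw [pvLt_true_iff] at hxy
          rw [pvLt_false_iff]
          omega
        · have hzy := hy z hz
          rw [pvLt_true_iff] at hxy
          rw [pvLt_false_iff] at hzy ⊢
          omega
      · exact List.Pairwise.cons hy hys
    · rw [if_neg hxy]
      constructor
      · intro z hz
        rcases (PySem.List.mem_insertBy pvLt x z ys).mp hz with rfl | hz
        · simpa using hxy
        · exact hy z hz
      · exact ih hys

-- the sorted list is ordered: no later element beats an earlier one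
theorem pvSorted2_pairwise (S : List (Int × Int)) :
    (PySem.List.sorted2 S (fun p => p.1 + p.2) (fun p => p.2)).Pairwise
      (fun a b => pvLt b a = false) := by
  unfold PySem.List.sorted2
  beta_reduce
  have : ∀ (l : List (Int × Int)) (acc : List (Int × Int)),
      acc.Pairwise (fun a b => pvLt b a = false) →
      (l.foldl (fun acc x => PySem.List.insertBy
        (fun a b => decide (a.1 + a.2 < b.1 + b.2) ||
          (!decide (b.1 + b.2 < a.1 + a.2) && decide (a.2 < b.2))) x acc) acc).Pairwise
        (fun a b => pvLt b a = false) := by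
    intro l
    induction l with
    | nil => intro acc h; exact h
    | cons x t ih =>
      intro acc h
      rw [List.foldl_cons]
      exact ih _ (pvInsertBy_pairwise _ (fun a b => rfl) x acc h)
  exact this S [] List.Pairwise.nil

-- head of the stable sort: a member beaten by nothing (wrt the (i+j, j) key)
theorem pvSorted2_head_spec (S : List (Int × Int)) (hS : S ≠ []) (d : Int × Int) :
    (PySem.List.sorted2 S (fun p => p.1 + p.2) (fun p => p.2)).headD d ∈ S ∧
      ∀ y ∈ S, pvLt y ((PySem.List.sorted2 S (fun p => p.1 + p.2) (fun p => p.2)).headD d) = false := by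
  have hperm := PySem.List.sorted2_perm S (fun p => p.1 + p.2) (fun p => p.2) false
  have hpw := pvSorted2_pairwise S
  rcases hsort : PySem.List.sorted2 S (fun p => p.1 + p.2) (fun p => p.2) with _ | ⟨h0, t0⟩
  · rw [hsort] at hperm
    rw [hperm.nil_eq] at hS
    exact absurd rfl hS
  · rw [hsort] at hperm hpw
    rcases hpw with _ | ⟨hh, _⟩
    simp only [List.headD_cons]
    refine ⟨hperm.mem_iff.mp List.mem_cons_self, ?_⟩
    intro y hy
    rcases List.mem_cons.mp ((hperm.mem_iff).mpr hy) with rfl | hy0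
    · rw [pvLt_false_iff]; omega
    · exact hh y hy0

theorem pvPairs_natCast (n m : Nat) :
    pvPairs (n : Int) (m : Int)
      = (List.range n).flatMap (fun (i : Nat) =>
          (List.range m).map (fun (j : Nat) => ((i : Int), (j : Int)))) := by
  simp only [pvPairs, PySem.List.pyRange_zero_natCast, List.flatMap_map, List.map_map]
  rfl

-- the Pre_ candidate list is a filter of the full pair list
theorem pvCandsP_eq (arr : List (List Int)) (weak : Int × Int) :
    pvCandsP arr weak
      = (pvPairs (arr.length : Int) (((arr.headD []).length : Int))).filter (pvCondB arr weak) := by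
  rw [pvCandsP, pvPairs_natCast]
  rfl

theorem pvRow0 (arr : List (List Int)) (hne : arr ≠ []) :
    (PySem.List.pyGet? arr 0).getD [] = arr.headD [] := by
  cases arr with
  | nil => exact absurd rfl hne
  | cons a t => simp [PySem.List.pyGet?, PySem.List.pyIdx?]

-- letfree forms of the two ports
theorem pvA_eq (arr : List (List Int)) (tla : List (Int × Int × Int)) (weak : Int × Int) :
    get_target_tower arr tla weak =
      (let r1 := (PySem.List.pyRange 0 (arr.length : Int) 1).foldl (fun s i =>
          (PySem.List.pyRange 0 ((((PySem.List.pyGet? arr 0).getD []).length : Int)) 1).foldl (fun s j =>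
            if (i, j) = weak ∨ pvCell arr i j = 0 then s
            else if s.1 = pvCell arr i j then (s.1, s.2 ++ [(i, j)])
            else if s.1 < pvCell arr i j then (pvCell arr i j, [(i, j)])
            else s) s) ((0 : Int), ([] : List (Int × Int)))
      if r1.2.length = 1 then r1.2.headD (0, 0)
      else
        let r2 := r1.2.foldl (fun s p =>
            if pvLook tla p = s.1 then (s.1, s.2 ++ [p])
            else if pvLook tla p < s.1 then (pvLook tla p, [p])
            else s) ((1000000000 : Int), ([] : List (Int × Int)))
        (PySem.List.sorted2 r2.2 (fun x => x.1 + x.2) (fun x => x.2)).headD (0, 0)) := rfl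

theorem pvB_eq (arr : List (List Int)) (tla : List (Int × Int × Int)) (weak : Int × Int) :
    get_target_tower_alt arr tla weak =
      (let maxval := (PySem.List.pyRange 0 (arr.length : Int) 1).foldl (fun mv i =>
          (PySem.List.pyRange 0 ((((PySem.List.pyGet? arr 0).getD []).length : Int)) 1).foldl (fun mv j =>
            if (i, j) ≠ weak ∧ mv < pvCell arr i j then pvCell arr i j else mv) mv) (0 : Int)
      if maxval = 0 then (-1, -1)
      else
        ((PySem.List.pyRange 0 (arr.length : Int) 1).foldl (fun b i =>
            (PySem.List.pyRange 0 ((((PySem.List.pyGet? arr 0).getD []).length : Int)) 1).foldl (fun b j =>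
              if (i, j) = weak ∨ pvCell arr i j ≠ maxval then b
              else pvChampStep tla b (i, j)) b)
          (none : Option (Int × Int))).getD (-1, -1)) := rfl

-- ===== VERDICT (by name: the statement is the Claim_ definition above) =====
theorem get_target_tower_spec : Claim_equal_get_target_tower := by
  intro arr tla weak _hdom hpre
  obtain ⟨hne, _hrows, hcands, htie⟩ := hpre
  unfold Spec_get_target_tower
  rw [pvA_eq, pvB_eq]
  dsimp only
  set n : Int := (arr.length : Int) with hn
  have hrow0 : (PySem.List.pyGet? arr 0).getD [] = arr.headD [] := pvRow0 arr hne
  set m : Int := (((PySem.List.pyGet? arr 0).getD []).length : Int) with hm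
  set cell : (Int × Int) → Int := (fun p => pvCell arr p.1 p.2) with hcell
  set candsA : List (Int × Int) :=
    (pvPairs n m).filter (fun p => !decide (p = weak ∨ cell p = 0)) with hcandsA
  set candsB : List (Int × Int) := (pvPairs n m).filter (pvCondB arr weak) with hcandsB
  have hPB : pvCandsP arr weak = candsB := by
    rw [pvCandsP_eq, hcandsB]
    rw [hm, hrow0]
  have hBA : ∀ p, p ∈ candsB → p ∈ candsA := by
    intro p hp
    rw [hcandsB, List.mem_filter] at hp
    rw [hcandsA, List.mem_filter]
    obtain ⟨hmem, hcond⟩ := hp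
    simp only [pvCondB, Bool.and_eq_true, decide_eq_true_eq] at hcond
    refine ⟨hmem, ?_⟩
    simp only [Bool.not_eq_eq_eq_not, Bool.not_true, decide_eq_false_iff_not]
    rintro (rfl | h0)
    · exact hcond.2 rfl
    · simp only [hcell] at h0
      omega
  -- A's first loop, in closed form
  rw [show (PySem.List.pyRange 0 n 1).foldl (fun s i =>
      (PySem.List.pyRange 0 m 1).foldl (fun s j =>
        if (i, j) = weak ∨ pvCell arr i j = 0 then s
        else if s.1 = pvCell arr i j then (s.1, s.2 ++ [(i, j)])
        else if s.1 < pvCell arr i j then (pvCell arr i j, [(i, j)])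
        else s) s) ((0 : Int), ([] : List (Int × Int)))
    = candsA.foldl (fun s p =>
        if s.1 = cell p then (s.1, s.2 ++ [p])
        else if s.1 < cell p then (cell p, [p])
        else s) ((0 : Int), ([] : List (Int × Int))) from by
    rw [pvFoldPairs n m (fun s p =>
        if p = weak ∨ cell p = 0 then s
        else if s.1 = cell p then (s.1, s.2 ++ [p])
        else if s.1 < cell p then (cell p, [p])
        else s)]
    rw [pvFoldSkip (fun p => p = weak ∨ cell p = 0)]]
  rw [runMaxTie cell candsA 0 []]
  set M0 : Int := (candsA.map cell).foldl max 0 with hM0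
  -- candsB is nonempty
  rw [hPB] at hcands
  obtain ⟨c, tB, hcB⟩ := List.exists_cons_of_ne_nil hcands
  have hcmem : c ∈ candsB := by rw [hcB]; exact List.mem_cons_self
  have hmemB_iff : ∀ p, p ∈ candsB ↔ p ∈ candsA ∧ 0 < cell p := by
    intro p
    constructor
    · intro hp
      refine ⟨hBA p hp, ?_⟩
      rw [hcandsB, List.mem_filter] at hp
      have := hp.2
      simp only [pvCondB, Bool.and_eq_true, decide_eq_true_eq] at this
      simpa [hcell] using this.1
    · intro ⟨hpA, hppos⟩
      rw [hcandsA, List.mem_filter] at hpA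
      rw [hcandsB, List.mem_filter]
      refine ⟨hpA.1, ?_⟩
      have := hpA.2
      simp only [Bool.not_eq_eq_eq_not, Bool.not_true, decide_eq_false_iff_not] at this
      simp only [pvCondB, Bool.and_eq_true, decide_eq_true_eq]
      constructor
      · simpa [hcell] using hppos
      · intro hw; exact this (Or.inl hw)
  have hleM0 : ∀ p ∈ candsA, cell p ≤ M0 := by
    intro p hp
    exact (PySem.List.le_foldl_max (candsA.map cell) 0).2 (cell p) (List.mem_map_of_mem hp)
  have hM0pos : 0 < M0 := by
    have h1 : cell c ≤ M0 := hleM0 c (hBA c hcmem)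
    have h2 : 0 < cell c := ((hmemB_iff c).mp hcmem).2
    omega
  have hM0mem : ∃ w ∈ candsB, cell w = M0 := by
    rcases PySem.List.foldl_max_mem (candsA.map cell) 0 with h | h
    · rw [← hM0] at h; omega
    · rw [← hM0] at h
      obtain ⟨w, hwA, hw⟩ := List.mem_map.mp h
      exact ⟨w, (hmemB_iff w).mpr ⟨hwA, by omega⟩, hw⟩
  have hM0ne : ¬ M0 = 0 := by omega
  set T : List (Int × Int) := candsA.filter (fun x => decide (cell x = M0)) with hTdef
  simp only [if_neg hM0ne]
  -- B's max scan computes M0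
  rw [show (PySem.List.pyRange 0 n 1).foldl (fun mv i =>
      (PySem.List.pyRange 0 m 1).foldl (fun mv j =>
        if (i, j) ≠ weak ∧ mv < pvCell arr i j then pvCell arr i j else mv) mv) (0 : Int)
    = (((pvPairs n m).filter (fun p => decide (p ≠ weak))).map cell).foldl max 0 from by
    rw [pvFoldPairs n m (fun mv p => if p ≠ weak ∧ mv < cell p then cell p else mv)]
    rw [runMaxCond (fun p => p ≠ weak) cell (pvPairs n m) 0]]
  set M1 : Int := (((pvPairs n m).filter (fun p => decide (p ≠ weak))).map cell).foldl max 0 with hM1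
  have hM1eq : M1 = M0 := by
    have hA1 : ∀ p ∈ candsA, p ∈ (pvPairs n m).filter (fun p => decide (p ≠ weak)) := by
      intro p hp
      rw [hcandsA, List.mem_filter] at hp
      rw [List.mem_filter]
      refine ⟨hp.1, ?_⟩
      have := hp.2
      simp only [Bool.not_eq_eq_eq_not, Bool.not_true, decide_eq_false_iff_not] at this
      simp only [decide_eq_true_eq]
      intro hw; exact this (Or.inl hw)
    have hle1 : M0 ≤ M1 := by
      rcases PySem.List.foldl_max_mem (candsA.map cell) 0 with h | h
      · rw [← hM0] at h
        rw [h]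
        exact (PySem.List.le_foldl_max _ 0).1
      · rw [← hM0] at h
        obtain ⟨w, hwA, hw⟩ := List.mem_map.mp h
        rw [← hw]
        exact (PySem.List.le_foldl_max _ 0).2 _ (List.mem_map_of_mem (hA1 w hwA))
    have hle2 : M1 ≤ M0 := by
      rcases PySem.List.foldl_max_mem (((pvPairs n m).filter (fun p => decide (p ≠ weak))).map cell) 0 with h | h
      · rw [← hM1] at h; omega
      · rw [← hM1] at h
        obtain ⟨w, hw1, hw⟩ := List.mem_map.mp h
        rw [List.mem_filter] at hw1
        by_cases h0 : cell w = 0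
        · omega
        · have hwA : w ∈ candsA := by
            rw [hcandsA, List.mem_filter]
            refine ⟨hw1.1, ?_⟩
            have := hw1.2
            simp only [decide_eq_true_eq] at this
            simp only [Bool.not_eq_eq_eq_not, Bool.not_true, decide_eq_false_iff_not]
            rintro (rfl | hc)
            · exact this rfl
            · exact h0 hc
          rw [← hw]
          exact hleM0 w hwA
    omega
  rw [hM1eq]
  simp only [if_neg hM0ne]
  -- B's champion scan is a champion fold over T
  rw [show (PySem.List.pyRange 0 n 1).foldl (fun b i =>
      (PySem.List.pyRange 0 m 1).foldl (fun b j =>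
        if (i, j) = weak ∨ pvCell arr i j ≠ M0 then b
        else pvChampStep tla b (i, j)) b)
      (none : Option (Int × Int))
    = ((pvPairs n m).filter (fun p => !decide (p = weak ∨ cell p ≠ M0))).foldl
        (pvChampStep tla) none from by
    rw [pvFoldPairs n m (fun b p =>
        if p = weak ∨ cell p ≠ M0 then b
        else pvChampStep tla b p)]
    rw [pvFoldSkip (fun p => p = weak ∨ cell p ≠ M0) (pvChampStep tla)]]
  have hfilT : (pvPairs n m).filter (fun p => !decide (p = weak ∨ cell p ≠ M0)) = T := by
    rw [hTdef, hcandsA, List.filter_filter]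
    apply List.filter_congr
    intro p _
    by_cases hw : p = weak
    · simp [hw]
    · by_cases hc : cell p = M0
      · simp [hw, hc, hM0ne]
      · simp [hw, hc]
  rw [hfilT]
  -- T is nonempty
  obtain ⟨w, hwB, hw⟩ := hM0mem
  have hwT : w ∈ T := by
    rw [hTdef, List.mem_filter]
    exact ⟨hBA w hwB, by simp [hw]⟩
  have hTne : T ≠ [] := fun h => by rw [h] at hwT; exact absurd hwT (List.not_mem_nil)
  obtain ⟨r, hrfold, hrT, hrmin⟩ := pvChamp_spec tla T hTne
  rw [hrfold]
  simp only [Option.getD_some]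
  by_cases hlen : T.length = 1
  · -- unique max: A returns the single element, which is also the champion
    rw [if_pos hlen]
    obtain ⟨a, t', hT1⟩ := List.exists_cons_of_ne_nil hTne
    have ht' : t' = [] := by
      rw [hT1] at hlen
      simpa using hlen
    rw [hT1, ht'] at hrT
    rw [hT1, ht']
    simp only [List.headD_cons]
    rcases List.mem_cons.mp hrT with rfl | h
    · rfl
    · exact absurd h (List.not_mem_nil)
  · rw [if_neg hlen]
    have hbestP : pvBestP arr weak = T := by
      rw [pvBestP, hPB, hTdef]
      rw [show candsA.filter (fun x => decide (cell x = M0))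
            = candsB.filter (fun p => decide (cell p = M0)) from by
        rw [hcandsA, hcandsB, List.filter_filter, List.filter_filter]
        apply List.filter_congr
        intro p _
        simp only [pvCondB, hcell]
        rcases Bool.eq_false_or_eq_true (decide (pvCell arr p.1 p.2 = M0)) with h1 | h1
        · rw [h1, Bool.true_and, Bool.true_and]
          rw [decide_eq_true_eq] at h1
          by_cases h2 : p = weak
          · simp [h2]
          · have h3 : 0 < pvCell arr p.1 p.2 := h1 ▸ hM0pos
            have h5 : ¬ pvCell arr p.1 p.2 = 0 := by omega
            simp [h2, h5, h3]
        · rw [h1, Bool.false_and, Bool.false_and]]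
      apply List.filter_congr
      intro p hp
      rw [decide_eq_decide]
      simp only [hcell]
      have h2 : cell p ≤ M0 := hleM0 p (hBA p hp)
      simp only [hcell] at h2
      constructor
      · intro hall
        have h1 := hall w hwB
        simp only [hcell] at hw
        omega
      · intro heq q hq
        have h3 := hleM0 q (hBA q hq)
        simp only [hcell] at h3
        omega
    have hT2 : 2 ≤ T.length := by
      have h0 := List.length_pos_of_mem hwT
      omega
    obtain ⟨_hkeys, pw, hpwT, hpwle⟩ := htie (by rw [hbestP]; exact hT2)
    rw [hbestP] at hpwT
    rw [runMinTie (fun p => pvLook tla p) T 1000000000 []]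
    set mn : Int := List.foldl min 1000000000 (List.map (fun p => pvLook tla p) T) with hmndef
    have h3 := PySem.List.foldl_min_le (T.map (fun p => pvLook tla p)) 1000000000
    have h4 := PySem.List.foldl_min_mem (T.map (fun p => pvLook tla p)) 1000000000
    rw [← hmndef] at h3 h4
    have hSif : (if mn = 1000000000 then
          [] ++ T.filter (fun x => decide (pvLook tla x = 1000000000))
        else T.filter (fun x => decide (pvLook tla x = mn)))
        = T.filter (fun x => decide (pvLook tla x = mn)) := by
      by_cases h : mn = 1000000000
      · rw [if_pos h, List.nil_append, h]
      · rw [if_neg h]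
    rw [hSif]
    set S : List (Int × Int) := T.filter (fun x => decide (pvLook tla x = mn)) with hSdef
    have hmnle : ∀ y ∈ T, mn ≤ pvLook tla y := by
      intro y hy
      exact h3.2 _ (List.mem_map_of_mem hy)
    have hSwit : ∃ u ∈ T, pvLook tla u = mn := by
      rcases h4 with h | h
      · refine ⟨pw, hpwT, ?_⟩
        have := hmnle pw hpwT
        omega
      · obtain ⟨u, huT, hu⟩ := List.mem_map.mp h
        exact ⟨u, huT, hu⟩
    have hSne : S ≠ [] := by
      obtain ⟨u, huT, hu⟩ := hSwit
      intro hnil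
      have : u ∈ S := List.mem_filter.mpr ⟨huT, by simp [hu]⟩
      rw [hnil] at this
      exact absurd this (List.not_mem_nil)
    obtain ⟨haS, hamin⟩ := pvSorted2_head_spec S hSne (0, 0)
    set a : Int × Int := (PySem.List.sorted2 S (fun p => p.1 + p.2) (fun p => p.2)).headD (0, 0) with hadef
    -- a is the champion: both directions of pvKLt are false, so a = r
    have haT : a ∈ T := (List.mem_filter.mp haS).1
    have hlooka : pvLook tla a = mn := by
      have := (List.mem_filter.mp haS).2
      simpa using this
    have h1 : pvKLt tla a r = false := hrmin a haT
    have h2 : pvKLt tla r a = false := by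
      rw [pvKLt_false_iff]
      have hmr := hmnle r hrT
      by_cases hrm : pvLook tla r = mn
      · have hrS : r ∈ S := List.mem_filter.mpr ⟨hrT, by simp [hrm]⟩
        have := hamin r hrS
        rw [pvLt_false_iff] at this
        omega
      · omega
    exact pvKLt_antisymm_eq tla a r h1 h2
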